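-- pv_equiv track=rewrite | github.com/MrGmo/codeWars-Python | 7kyu/numbers-in-strings.py | solve
-- ===== SOURCE A (Python) =====
-- def solve(s):
--     max_num = '0'
--     temp_num = '0'
--     for char in s:
--         if char.isdigit():
--             temp_num += char
--             if int(temp_num) > int(max_num):
--                 max_num = temp_num
--         else:
--             temp_num = ''
--     return int(max_num)
-- ===== SOURCE B (Python) =====
-- def solve(s):
--     tokens = ''.join(c if c.isdigit() else ' ' for c in s).split()
--     return max((int(t) for t in tokens), default=0)
-- ===== Notes on version B (the rewrite author's own statement) =====
-- stated objective: idiomatic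
-- what changed: A streams over characters keeping a running max via repeated int() re-parses of the growing digit string; B first extracts all maximal digit tokens at once (map non-digits to spaces, then split) and then does a single reduction max(..., default=0) over their int values.
import Mathlib
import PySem

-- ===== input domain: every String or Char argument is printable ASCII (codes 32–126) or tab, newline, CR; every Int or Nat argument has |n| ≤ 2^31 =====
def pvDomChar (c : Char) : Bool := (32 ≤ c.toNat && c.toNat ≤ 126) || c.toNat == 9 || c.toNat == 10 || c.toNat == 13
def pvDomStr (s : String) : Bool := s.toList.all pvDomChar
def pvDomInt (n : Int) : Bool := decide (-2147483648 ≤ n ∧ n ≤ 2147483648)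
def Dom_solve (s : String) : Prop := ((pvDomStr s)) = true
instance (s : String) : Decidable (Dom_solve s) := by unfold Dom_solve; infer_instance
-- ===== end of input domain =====

-- B extracts all maximal digit tokens at once and reduces with max(..., default=0),
-- instead of A's streaming scan with repeated int() re-parses; same return value everywhere.

-- ===== PORT A =====
-- Hand port of Python's int(str): exact on the strings this program passes to int(),
-- which are always nonempty and consist only of ASCII digits '0'-'9'
-- (no sign, no whitespace, no underscore), so int(cs) is the plain base-10 value.
def digitsToInt (cs : List Char) : Int :=
  cs.foldl (fun a c => a * 10 + ((c.toNat : Int) - 48)) 0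

-- literal transliteration of A: state (max_num, temp_num) as character lists,
-- char.isdigit() on a 1-char string is PySem.Chars.isdigit of the character.
def solve (s : String) : Int :=
  let st := s.toList.foldl
    (fun (p : List Char × List Char) c =>
      if PySem.Chars.isdigit c then
        let temp := p.2 ++ [c]
        if digitsToInt temp > digitsToInt p.1 then (temp, temp) else (p.1, temp)
      else (p.1, []))
    (['0'], ['0'])
  digitsToInt st.1

-- ===== PORT B =====
-- literal transliteration of Source B: ''.join(c if c.isdigit() else ' ' for c in s).split()
-- is the mapped character list split on whitespace (PySem.Chars.split₀ = str.split());
-- max((int(t) for t in tokens), default=0) is max? of the int values with default 0.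
def solve_alt (s : String) : Int :=
  let tokens := PySem.Chars.split₀
    (s.toList.map (fun c => if PySem.Chars.isdigit c then c else ' '))
  ((PySem.List.max? (tokens.map (fun t => digitsToInt t)) (fun x => x)).getD 0)

-- ===== PRECONDITION & SPEC =====
def Spec_solve (s : String) (out : Int) : Prop := out = solve_alt s
instance (s : String) (out : Int) : Decidable (Spec_solve s out) := by unfold Spec_solve; infer_instance

-- ===== CLAIM (what is proved, stated in full; the proofs are below) =====
def Claim_equal_solve : Prop := ∀ (s : String), Dom_solve s → Spec_solve s (solve s)

-- ===== LEMMAS AND PROOFS =====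

-- A's fold step, named for the proofs (identical to the lambda in `solve`).
def stepA (p : List Char × List Char) (c : Char) : List Char × List Char :=
  if PySem.Chars.isdigit c then
    let temp := p.2 ++ [c]
    if digitsToInt temp > digitsToInt p.1 then (temp, temp) else (p.1, temp)
  else (p.1, [])

-- B's character substitution, named for the proofs.
def subB (c : Char) : Char := if PySem.Chars.isdigit c then c else ' '

theorem digitsToInt_append (t : List Char) (c : Char) :
    digitsToInt (t ++ [c]) = digitsToInt t * 10 + ((c.toNat : Int) - 48) := by
  simp [digitsToInt, List.foldl_append]

theorem isdigit_toNat {c : Char} (h : PySem.Chars.isdigit c = true) :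
    48 ≤ c.toNat ∧ c.toNat ≤ 57 := by
  simp only [PySem.Chars.isdigit, Bool.and_eq_true, decide_eq_true_eq, Char.le_def] at h
  obtain ⟨h1, h2⟩ := h
  rw [UInt32.le_iff_toNat_le] at h1 h2
  exact ⟨h1, h2⟩

theorem isspace_of_digit {c : Char} (h : PySem.Chars.isdigit c = true) :
    PySem.Chars.isspace c = false := by
  obtain ⟨h1, h2⟩ := isdigit_toNat h
  simp only [PySem.Chars.isspace]
  simp only [Bool.or_eq_false_iff, Bool.and_eq_false_iff, decide_eq_false_iff_not]
  omega

-- foldr max with a nonnegative seed over a list pulls the seed out.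
theorem foldr_max_seed (xs : List Int) (b : Int) (hb : 0 ≤ b) :
    xs.foldr max b = max b (xs.foldr max 0) := by
  induction xs with
  | nil => simp; omega
  | cons x xs ih =>
    simp only [List.foldr_cons, ih]
    rcases le_total b x with h | h <;> rcases le_total x (xs.foldr max 0) with h' | h' <;>
      simp [max_def] <;> omega

-- foldl max from a nonnegative seed equals max of seed and foldr max 0.
theorem foldl_max_seed (xs : List Int) (b : Int) (hb : 0 ≤ b) :
    xs.foldl max b = max b (xs.foldr max 0) := by
  induction xs generalizing b with
  | nil => simp; omega
  | cons x xs ih =>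
    simp only [List.foldl_cons, List.foldr_cons]
    rw [ih (max b x) (le_trans hb (le_max_left _ _))]
    rcases le_total b x with h | h <;> rcases le_total x (xs.foldr max 0) with h' | h' <;>
      simp [max_def] <;> omega

theorem foldr_max_append (xs : List Int) (x : Int) (hx : 0 ≤ x) :
    (xs ++ [x]).foldr max 0 = max x (xs.foldr max 0) := by
  rw [List.foldr_append]
  simp only [List.foldr_cons, List.foldr_nil]
  rw [foldr_max_seed xs (max x 0) (le_max_right _ _)]
  omega

theorem foldr_max_reverse (xs : List Int) (h : ∀ x ∈ xs, 0 ≤ x) :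
    xs.reverse.foldr max 0 = xs.foldr max 0 := by
  induction xs with
  | nil => rfl
  | cons x xs ih =>
    simp only [List.reverse_cons]
    rw [foldr_max_append _ x (h x (by simp)), ih (fun y hy => h y (by simp [hy]))]
    simp

-- The final-value bridge: B's max?-with-default over token values equals
-- max of 0 and the foldr-max of the values, when all values are nonnegative.
theorem maxD_eq_foldr (toks : List (List Char))
    (h : ∀ a ∈ toks, 0 ≤ digitsToInt a) :
    ((PySem.List.max? (toks.map (fun t => digitsToInt t)) (fun x => x)).getD 0)
      = (toks.map digitsToInt).foldr max 0 := by
  cases toks with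
  | nil => rfl
  | cons r rs =>
    rw [List.map_cons, PySem.List.max?_id_cons, Option.getD_some]
    rw [foldl_max_seed _ _ (h r (by simp))]
    rw [List.foldr_cons]

-- Main simulation: A's left fold with state (max_num, temp_num) against
-- split₀.go on the substituted characters with state (cur, acc).
theorem main_sim (cs : List Char) :
    ∀ (m t cur : List Char) (acc : List (List Char)),
    digitsToInt t = digitsToInt cur.reverse →
    0 ≤ digitsToInt t →
    (∀ a ∈ acc, 0 ≤ digitsToInt a) →
    digitsToInt m = max ((acc.map digitsToInt).foldr max 0) (digitsToInt t) →
    digitsToInt (cs.foldl stepA (m, t)).1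
      = ((PySem.List.max?
            ((PySem.Chars.split₀.go (cs.map subB) cur acc).map (fun t => digitsToInt t))
            (fun x => x)).getD 0) := by
  induction cs with
  | nil =>
    intro m t cur acc h1 h2 h3 h4
    simp only [List.foldl_nil, List.map_nil]
    simp only [PySem.Chars.split₀.go]
    have hX : 0 ≤ (acc.map digitsToInt).foldr max 0 := by
      conv_rhs => rw [foldr_max_seed _ 0 le_rfl]
      exact le_max_left 0 _
    by_cases hc : cur = []
    · subst hc
      simp only [List.isEmpty_nil, if_true]
      rw [maxD_eq_foldr _ (fun a ha => h3 a (List.mem_reverse.mp ha))]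
      rw [List.map_reverse, foldr_max_reverse _ (fun x hx => by
        obtain ⟨a, ha, rfl⟩ := List.mem_map.mp hx; exact h3 a ha)]
      have ht0 : digitsToInt t = 0 := by rw [h1]; rfl
      rw [h4, ht0]
      exact max_eq_left hX
    · have hce : cur.isEmpty = false := by simp [hc]
      rw [hce]
      simp only [Bool.false_eq_true, if_false]
      have hcr : 0 ≤ digitsToInt cur.reverse := h1 ▸ h2
      rw [maxD_eq_foldr _ (by
        intro a ha
        simp only [List.reverse_cons, List.mem_append, List.mem_reverse,
          List.mem_singleton] at ha
        rcases ha with ha | rfl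
        · exact h3 a ha
        · exact hcr)]
      simp only [List.reverse_cons, List.map_append, List.map_cons, List.map_nil]
      rw [foldr_max_append _ _ hcr]
      rw [List.map_reverse, foldr_max_reverse _ (fun x hx => by
        obtain ⟨a, ha, rfl⟩ := List.mem_map.mp hx; exact h3 a ha)]
      rw [h4, h1, max_comm]
  | cons c rest ih =>
    intro m t cur acc h1 h2 h3 h4
    simp only [List.map_cons, List.foldl_cons]
    by_cases hd : PySem.Chars.isdigit c
    · have hsub : subB c = c := by simp [subB, hd]
      rw [hsub]
      simp only [PySem.Chars.split₀.go, isspace_of_digit hd,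
        Bool.false_eq_true, if_false]
      have hstep : stepA (m, t) c =
          if digitsToInt (t ++ [c]) > digitsToInt m then (t ++ [c], t ++ [c])
          else (m, t ++ [c]) := by
        simp [stepA, hd]
      rw [hstep]
      obtain ⟨hc1, hc2⟩ := isdigit_toNat hd
      have hc1' : (48 : Int) ≤ (c.toNat : Int) := by exact_mod_cast hc1
      have hti : digitsToInt (t ++ [c])
          = digitsToInt t * 10 + ((c.toNat : Int) - 48) := digitsToInt_append t c
      have h1' : digitsToInt (t ++ [c]) = digitsToInt ((c :: cur).reverse) := by
        rw [List.reverse_cons, digitsToInt_append, digitsToInt_append, h1]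
      have h2' : 0 ≤ digitsToInt (t ++ [c]) := by rw [hti]; omega
      have hTT' : digitsToInt t ≤ digitsToInt (t ++ [c]) := by rw [hti]; omega
      by_cases hcmp : digitsToInt (t ++ [c]) > digitsToInt m
      · rw [if_pos hcmp]
        apply ih _ _ _ _ h1' h2' h3
        rw [h4] at hcmp
        exact (max_eq_right (le_of_lt (lt_of_le_of_lt (le_max_left _ _) hcmp))).symm
      · rw [if_neg hcmp]
        apply ih _ _ _ _ h1' h2' h3
        rw [h4] at hcmp ⊢
        rw [max_def, max_def] at *
        split_ifs at * <;> omega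
    · have hsub : subB c = ' ' := by simp [subB, hd]
      have hsp : PySem.Chars.isspace ' ' = true := by decide
      rw [hsub]
      simp only [PySem.Chars.split₀.go, hsp, if_true]
      have hstep : stepA (m, t) c = (m, []) := by simp [stepA, hd]
      rw [hstep]
      have ht0 : digitsToInt ([] : List Char) = 0 := rfl
      by_cases hc : cur = []
      · subst hc
        simp only [List.isEmpty_nil, if_true]
        apply ih m [] [] acc rfl le_rfl h3
        have htt : digitsToInt t = 0 := by rw [h1]; rfl
        rw [show digitsToInt ([] : List Char) = (0 : Int) from rfl, h4, htt]
      · have hce : cur.isEmpty = false := by simp [hc]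
        rw [hce]
        simp only [Bool.false_eq_true, if_false]
        have hcr : 0 ≤ digitsToInt cur.reverse := h1 ▸ h2
        apply ih m [] [] (cur.reverse :: acc) rfl le_rfl (by
          intro a ha
          rcases List.mem_cons.mp ha with rfl | ha
          · exact hcr
          · exact h3 a ha)
        simp only [List.map_cons, List.foldr_cons, ht0]
        rw [h4, h1]
        rw [max_def, max_def, max_def] at *
        split_ifs at * <;> omega

-- ===== VERDICT (by name: the statement is the Claim_ definition above) =====
theorem solve_spec : Claim_equal_solve := by
  intro s _
  unfold Spec_solve solve solve_alt
  have h := main_sim s.toList ['0'] ['0'] [] []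
  have h0 : digitsToInt ['0'] = 0 := by decide
  have hstep : (fun (p : List Char × List Char) c =>
      if PySem.Chars.isdigit c then
        let temp := p.2 ++ [c]
        if digitsToInt temp > digitsToInt p.1 then (temp, temp) else (p.1, temp)
      else (p.1, [])) = stepA := rfl
  have hsub : (fun c => if PySem.Chars.isdigit c then c else ' ') = subB := rfl
  rw [hstep, hsub]
  rw [h (by simp [digitsToInt]) (by simp [h0]) (by simp) (by simp [h0])]
  rfl
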